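-- pv_equiv track=rewrite | github.com/Scotts-Thoughts/fury_cutter | premiere_label_sender.py | parse_sendkeys
-- ===== SOURCE A (Python) =====
-- def parse_sendkeys(shortcut: str) -> tuple:
--     """Convert SendKeys format (^+1) to pyautogui format ('ctrl', 'shift', '1')."""
--     modifiers = []
--     keys = []
--
--     i = 0
--     while i < len(shortcut):
--         char = shortcut[i]
--
--         if char == '^':
--             modifiers.append('ctrl')
--         elif char == '+':
--             modifiers.append('shift')
--         elif char == '%':
--             modifiers.append('alt')
--         elif char == '{':
--             # Special key like {F1}
--             end = shortcut.find('}', i)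
--             if end != -1:
--                 key_name = shortcut[i+1:end].lower()
--                 keys.append(key_name)
--                 i = end
--         else:
--             keys.append(char.lower() if char.isalpha() else char)
--
--         i += 1
--
--     return tuple(modifiers + keys)
-- ===== SOURCE B (Python) =====
-- MOD = {'^': 'ctrl', '+': 'shift', '%': 'alt'}
--
-- def _tokenize(shortcut):
--     """Split into tokens: each '{...}' group is one token, every other char its own token."""
--     tokens = []
--     rest = shortcut
--     while rest:
--         if rest[0] == '{' and '}' in rest:
--             inner, _, rest = rest[1:].partition('}')
--             tokens.append('{' + inner + '}')
--         else:
--             tokens.append(rest[0])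
--             rest = rest[1:]
--     return tokens
--
-- def parse_sendkeys(shortcut: str) -> tuple:
--     """Convert SendKeys format (^+1) to pyautogui format ('ctrl', 'shift', '1')."""
--     modifiers = []
--     keys = []
--     for tok in _tokenize(shortcut):
--         if tok in MOD:
--             modifiers.append(MOD[tok])
--         elif len(tok) > 1:
--             keys.append(tok[1:-1].lower())
--         elif tok != '{':
--             keys.append(tok.lower() if tok.isalpha() else tok)
--     return tuple(modifiers + keys)
-- ===== Notes on version B (the rewrite author's own statement) =====
-- stated objective: idiomatic
-- what changed: Replaced A's single index-juggling while loop (with i = end jumps and str.find) by a two-phase tokenize-then-classify decomposition: first split the string into tokens ('{...}' groups via partition, single chars otherwise), then classify each token with a modifier dict.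
import Mathlib
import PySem

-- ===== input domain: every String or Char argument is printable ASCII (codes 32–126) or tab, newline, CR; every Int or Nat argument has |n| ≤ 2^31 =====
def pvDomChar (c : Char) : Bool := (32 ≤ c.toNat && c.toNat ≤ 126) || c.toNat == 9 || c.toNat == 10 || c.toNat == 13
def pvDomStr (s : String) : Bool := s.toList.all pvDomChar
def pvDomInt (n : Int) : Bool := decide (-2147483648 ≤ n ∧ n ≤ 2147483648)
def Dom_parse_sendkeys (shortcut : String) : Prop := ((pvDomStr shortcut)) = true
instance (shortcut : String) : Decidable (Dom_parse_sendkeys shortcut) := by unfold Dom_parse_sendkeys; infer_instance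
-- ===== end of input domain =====

-- B re-decomposes A's index loop into tokenize-then-classify (same values; objective: idiomatic/alternative, no speed claim).
-- Python returns a tuple of strings; per the type convention both ports return the List String of its elements.

-- ===== PORT A =====
-- A's while loop over index i; modifiers/keys are the two accumulators, returned as modifiers ++ keys.
def pvLoopA (cs : List Char) (i : Nat) (mods keys : List String) : List String :=
  if h : i < cs.length then
    let c := cs[i]
    if c = '^' then pvLoopA cs (i+1) (mods ++ ["ctrl"]) keys
    else if c = '+' then pvLoopA cs (i+1) (mods ++ ["shift"]) keys
    else if c = '%' then pvLoopA cs (i+1) (mods ++ ["alt"]) keys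
    else if c = '{' then
      -- end = shortcut.find('}', i)
      let e := PySem.Chars.findFrom cs ['}'] (i : Int)
      if he : e ≠ -1 then
        -- key_name = shortcut[i+1:end].lower(); keys.append(key_name); i = end (then i += 1)
        pvLoopA cs (e.toNat + 1) mods
          (keys ++ [String.ofList (PySem.Chars.lower (PySem.List.slice cs (some ((i : Int) + 1)) (some e)))])
      else pvLoopA cs (i+1) mods keys
    else
      -- keys.append(char.lower() if char.isalpha() else char)
      pvLoopA cs (i+1) mods (keys ++ [if PySem.Chars.isalpha c then String.ofList (PySem.Chars.lower [c]) else String.ofList [c]])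
  else mods ++ keys
termination_by cs.length - i
decreasing_by
  · omega
  · omega
  · omega
  · have hs := PySem.Chars.findFrom_natCast_spec cs ['}'] i (Nat.le_of_lt h) he
    omega
  · omega
  · omega

def parse_sendkeys (shortcut : String) : List String :=
  pvLoopA shortcut.toList 0 [] []

-- ===== PORT B =====
-- MOD = {'^': 'ctrl', '+': 'shift', '%': 'alt'}
def pvMOD : PySem.Dict (List Char) String :=
  PySem.Dict.ofList [(['^'], "ctrl"), (['+'], "shift"), (['%'], "alt")]

-- _tokenize: each '{...}' group one token, every other char its own token.
-- rest[1:].partition('}') is ported by hand as takeWhile/dropWhile at the first '}' (exact: the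
-- separator is a single char, so inner = chars before the first '}', remainder = chars after it).
def pvTokenize (cs : List Char) : List (List Char) :=
  match cs with
  | [] => []
  | c :: rest =>
    if c = '{' ∧ PySem.Chars.isIn ['}'] (c :: rest) then
      ('{' :: rest.takeWhile (· ≠ '}') ++ ['}']) :: pvTokenize ((rest.dropWhile (· ≠ '}')).drop 1)
    else [c] :: pvTokenize rest
termination_by cs.length
decreasing_by
  · have := List.length_dropWhile_le (fun x => decide (x ≠ '}')) rest
    simp only [List.length_cons, List.length_drop]
    omega
  · simp

-- the classification loop: for tok in tokens: …
def pvClassify (toks : List (List Char)) (mods keys : List String) : List String :=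
  match toks with
  | [] => mods ++ keys
  | t :: ts =>
    match PySem.Dict.get? pvMOD t with   -- if tok in MOD: modifiers.append(MOD[tok])
    | some m => pvClassify ts (mods ++ [m]) keys
    | none =>
      if 1 < t.length then               -- elif len(tok) > 1: keys.append(tok[1:-1].lower())
        pvClassify ts mods (keys ++ [String.ofList (PySem.Chars.lower (PySem.List.slice t (some 1) (some (-1))))])
      else if t ≠ ['{'] then             -- elif tok != '{': keys.append(tok.lower() if tok.isalpha() else tok)
        pvClassify ts mods (keys ++ [if PySem.Chars.strIsalpha t then String.ofList (PySem.Chars.lower t) else String.ofList t])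
      else
        pvClassify ts mods keys

def parse_sendkeys_alt (shortcut : String) : List String :=
  pvClassify (pvTokenize shortcut.toList) [] []

-- ===== PRECONDITION & SPEC =====
def Spec_parse_sendkeys (shortcut : String) (out : List String) : Prop := out = parse_sendkeys_alt shortcut
instance (shortcut : String) (out : List String) : Decidable (Spec_parse_sendkeys shortcut out) := by unfold Spec_parse_sendkeys; infer_instance

-- ===== CLAIM (what is proved, stated in full; the proofs are below) =====
def Claim_equal_parse_sendkeys : Prop := ∀ (shortcut : String), Dom_parse_sendkeys shortcut → Spec_parse_sendkeys shortcut (parse_sendkeys shortcut)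

-- ===== LEMMAS AND PROOFS =====

lemma pvMOD_caret : PySem.Dict.get? pvMOD ['^'] = some "ctrl" := by rfl
lemma pvMOD_plus : PySem.Dict.get? pvMOD ['+'] = some "shift" := by rfl
lemma pvMOD_pct : PySem.Dict.get? pvMOD ['%'] = some "alt" := by rfl
lemma pvMOD_none (t : List Char) (h1 : t ≠ ['^']) (h2 : t ≠ ['+']) (h3 : t ≠ ['%']) :
    PySem.Dict.get? pvMOD t = none := by
  have b1 : (['^'] == t) = false := beq_eq_false_iff_ne.mpr (Ne.symm h1)
  have b2 : (['+'] == t) = false := beq_eq_false_iff_ne.mpr (Ne.symm h2)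
  have b3 : (['%'] == t) = false := beq_eq_false_iff_ne.mpr (Ne.symm h3)
  simp [pvMOD, PySem.Dict.get?, PySem.Dict.ofList, PySem.Dict.update, PySem.Dict.insert, PySem.Dict.empty, List.find?, b1, b2, b3]



-- takeWhile/dropWhile cut a char list exactly at the first occurrence of '}'
lemma pv_takeWhile_eq_take (l : List Char) (j : Nat) (hj : j < l.length)
    (h1 : l[j] = '}') (h2 : ∀ m (hm : m < j), l[m]'(by omega) ≠ '}') :
    l.takeWhile (· ≠ '}') = l.take j ∧ l.dropWhile (· ≠ '}') = l.drop j := by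
  induction l generalizing j with
  | nil => simp at hj
  | cons a t ih =>
    cases j with
    | zero => simp_all [List.takeWhile, List.dropWhile]
    | succ j' =>
      have ha : a ≠ '}' := h2 0 (Nat.succ_pos _)
      have := ih j' (by simpa using hj) (by simpa using h1)
        (fun m hm => by have := h2 (m+1) (by omega); simpa using this)
      simpa [List.takeWhile_cons, List.dropWhile_cons, ha] using this

lemma pvMOD_none_brace (l : List Char) :
    PySem.Dict.get? pvMOD ('{' :: l) = none := by
  apply pvMOD_none <;> simp

lemma pv_singleton_prefix (x : Char) (l : List Char) : ['}'] <+: (x :: l) ↔ x = '}' := by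
  simp [List.prefix_cons_iff, eq_comm]

lemma pv_slice_inner (x y : Char) (mid : List Char) :
    PySem.List.slice (x :: (mid ++ [y])) (some 1) (some (-1)) = mid := by
  simp [PySem.List.slice, PySem.List.clampIdx]
  rw [if_neg (by omega)]
  simp [List.take_left']

lemma pv_main (cs : List Char) (i : Nat) (mods keys : List String) :
    pvLoopA cs i mods keys = pvClassify (pvTokenize (cs.drop i)) mods keys := by
  induction i, mods, keys using pvLoopA.induct cs with
  | case1 i mods keys h c hc ih =>
    have hc' : cs[i] = '^' := hc
    rw [pvLoopA, List.drop_eq_getElem_cons h, pvTokenize]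
    simp [hc', pvClassify, pvMOD_caret, ih, Nat.not_le.mpr h]
  | case2 i mods keys h hc1 c hc ih =>
    have hc' : cs[i] = '+' := hc
    rw [pvLoopA, List.drop_eq_getElem_cons h, pvTokenize]
    simp [hc', pvClassify, pvMOD_plus, ih, Nat.not_le.mpr h]
  | case3 i mods keys h hc1 hc2 c hc ih =>
    have hc' : cs[i] = '%' := hc
    rw [pvLoopA, List.drop_eq_getElem_cons h, pvTokenize]
    simp [hc', pvClassify, pvMOD_pct, ih, Nat.not_le.mpr h]
  | case7 i mods keys h =>
    rw [pvLoopA, List.drop_eq_nil_of_le (Nat.le_of_not_lt h), pvTokenize]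
    simp [pvClassify, h]
  | case5 i mods keys h hc1 hc2 hc3 c hc e he ih =>
    have hc' : cs[i] = '{' := hc
    have hne : PySem.Chars.findFrom cs ['}'] (i:Int) = -1 := not_not.mp he
    have hni := (PySem.Chars.findFrom_natCast_eq_neg_one_iff cs ['}'] i h.le).mp hne
    have hisIn : PySem.Chars.isIn ['}'] ('{' :: List.drop (i+1) cs) = false := by
      rw [← hc', ← List.drop_eq_getElem_cons h]
      exact (PySem.Chars.isIn_eq_false_iff _ _).mpr hni
    have g := pvMOD_none_brace []
    rw [pvLoopA, List.drop_eq_getElem_cons h, pvTokenize]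
    simp [hc', hne, hisIn, pvClassify, g, ih, h]
  | case6 i mods keys h c hc1 hc2 hc3 hc4 ih =>
    have hc1' : cs[i] ≠ '^' := hc1
    have hc2' : cs[i] ≠ '+' := hc2
    have hc3' : cs[i] ≠ '%' := hc3
    have hc4' : cs[i] ≠ '{' := hc4
    have g := pvMOD_none [cs[i]] (by simpa using hc1') (by simpa using hc2') (by simpa using hc3')
    rw [pvLoopA, List.drop_eq_getElem_cons h, pvTokenize]
    simp [hc1', hc2', hc3', hc4', pvClassify, g, h, PySem.Chars.strIsalpha]
    exact ih
  | case4 i mods keys h hc1 hc2 hc3 c hc e he ih =>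
    have hc' : cs[i] = '{' := hc
    have he' : PySem.Chars.findFrom cs ['}'] (i:Int) ≠ -1 := he
    obtain ⟨hle, hpre, hmin⟩ := PySem.Chars.findFrom_natCast_spec cs ['}'] i h.le he'
    have h0e : (0:Int) ≤ PySem.Chars.findFrom cs ['}'] (i:Int) := le_trans (Int.natCast_nonneg i) hle
    set n := (PySem.Chars.findFrom cs ['}'] (i:Int)).toNat with hn
    have hnl : n < cs.length := by
      by_contra hx
      rw [List.drop_eq_nil_of_le (Nat.le_of_not_lt hx)] at hpre
      simp at hpre
    have hne' : cs[n] = '}' := by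
      rw [List.drop_eq_getElem_cons hnl] at hpre
      exact (pv_singleton_prefix _ _).mp hpre
    have hge : i ≤ n := by omega
    have hin : i < n := by
      rcases Nat.eq_or_lt_of_le hge with hx | hx
      · exfalso; simp only [hx] at hc'; exact absurd (hc'.symm.trans hne') (by decide)
      · exact hx
    have hmin' : ∀ m (hm : m < n - (i+1)), (List.drop (i+1) cs)[m]'(by simp; omega) ≠ '}' := by
      intro m hm
      have hj : i+1+m < cs.length := by omega
      have hx := hmin (i+1+m) (by omega) (by omega)
      rw [List.drop_eq_getElem_cons hj, pv_singleton_prefix] at hx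
      simpa [List.getElem_drop] using hx
    have hidx : (List.drop (i+1) cs)[n-(i+1)]'(by simp; omega) = '}' := by
      rw [List.getElem_drop]
      have hrw : (i+1) + (n-(i+1)) = n := by omega
      simp only [hrw]
      exact hne'
    obtain ⟨htw, hdw⟩ := pv_takeWhile_eq_take (List.drop (i+1) cs) (n - (i+1))
      (by simp; omega) hidx hmin'
    simp only [ne_eq, decide_not] at htw hdw
    have hisIn : PySem.Chars.isIn ['}'] ('{' :: List.drop (i+1) cs) = true := by
      rw [PySem.Chars.isIn_iff_infix, List.singleton_infix_iff]
      exact List.mem_cons_of_mem _ (hidx ▸ List.getElem_mem _)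
    have hcont : (List.drop (n-(i+1)) (List.drop (i+1) cs)).tail = List.drop (n+1) cs := by
      rw [List.drop_drop, List.tail_drop]
      congr 1
      omega
    have htn : ((i:Int)+1).toNat = i + 1 := by omega
    have hsliceA : PySem.List.slice cs (some ((i:Int)+1)) (some (PySem.Chars.findFrom cs ['}'] (i:Int))) =
        List.take (n - (i+1)) (List.drop (i+1) cs) := by
      rw [PySem.List.slice_toNat cs (by omega) h0e, htn, ← hn]
    have hE : e = PySem.Chars.findFrom cs ['}'] (i:Int) := rfl
    rw [hE, hsliceA] at ih
    rw [pvLoopA, List.drop_eq_getElem_cons h, pvTokenize]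
    have harith : i+1+(n-(i+1))+1 = n+1 := by omega
    simp [hc', hisIn, he', h, htw, hdw, harith, pvClassify, pvMOD_none_brace, hsliceA, ← hn]
    rw [pv_slice_inner]
    exact ih

-- ===== VERDICT (by name: the statement is the Claim_ definition above) =====
theorem parse_sendkeys_spec : Claim_equal_parse_sendkeys := by
  intro s _
  unfold Spec_parse_sendkeys parse_sendkeys parse_sendkeys_alt
  simpa using pv_main s.toList 0 [] []
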